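-- pv_equiv track=rewrite | github.com/Code-Institute-Submissions/stream-two-data-centric-python-recipme | write_recipe.py | merge_recipe_id_into_method
-- ===== SOURCE A (Python) =====
-- def merge_recipe_id_into_method(method_item, recipe_primary_key):
--     """ ADD RECIPE ID TO LIST READY FOR WRITING TO TABLE """
--     method = []
--
--     for i in range(0, len(method_item[0])):
--         method.append(method_item[0][i])
--         method.append(method_item[1][i])
--         method.append(recipe_primary_key)
--     # SPLIT LIST INTO SUBLISTS FOR FIELD ENTRY #
--     method_split = [method[i: i+3] for i in range(0, len(method), 3)]
--
--     return method_split
-- ===== SOURCE B (Python) =====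
-- def merge_recipe_id_into_method(method_item, recipe_primary_key):
--     """ ADD RECIPE ID TO LIST READY FOR WRITING TO TABLE """
--     def go(steps, orders):
--         if not steps:
--             return []
--         return [[steps[0], orders[0], recipe_primary_key]] + go(steps[1:], orders[1:])
--     if not method_item[0]:
--         return []
--     return go(method_item[0], method_item[1])
-- ===== Notes on version B (the rewrite author's own statement) =====
-- stated objective: alternative
-- what changed: B replaces A's index-driven flatten-then-rechunk (a flat list built by three appends per index, then sliced back into triples) by a structural recursion that walks the two rows in parallel and emits each [step, order, id] triple directly, with no indices, no flat intermediate list and no second chunking pass.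
import Mathlib
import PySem

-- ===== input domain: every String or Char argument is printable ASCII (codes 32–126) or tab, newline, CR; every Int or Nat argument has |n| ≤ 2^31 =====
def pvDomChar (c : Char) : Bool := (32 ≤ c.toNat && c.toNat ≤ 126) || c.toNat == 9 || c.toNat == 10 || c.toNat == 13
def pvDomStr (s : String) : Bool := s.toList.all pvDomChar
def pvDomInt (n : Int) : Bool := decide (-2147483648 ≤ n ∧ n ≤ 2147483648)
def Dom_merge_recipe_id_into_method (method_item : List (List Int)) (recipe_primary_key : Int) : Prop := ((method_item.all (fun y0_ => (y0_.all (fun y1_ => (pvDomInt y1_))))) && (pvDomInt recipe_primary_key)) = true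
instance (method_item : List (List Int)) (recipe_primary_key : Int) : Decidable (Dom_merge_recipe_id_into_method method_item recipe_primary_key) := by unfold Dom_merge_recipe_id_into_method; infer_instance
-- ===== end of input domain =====

-- B replaces A's index-driven flatten-then-rechunk by a structural recursion over the
-- two rows in parallel, emitting each triple directly; same O(n) cost, different shape.

-- ===== PORT A =====
-- Literal port of A: build the flat list by three appends per index, then re-chunk
-- it with the slice comprehension [method[i:i+3] for i in range(0, len(method), 3)].
-- Out-of-range indexing (where Python raises IndexError) is read through pyGetD with
-- a default; Pre_ below excludes exactly those inputs.
def merge_recipe_id_into_method (method_item : List (List Int)) (recipe_primary_key : Int) : List (List Int) :=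
  let method : List Int :=
    (PySem.List.pyRange 0 (PySem.List.len (PySem.List.pyGetD method_item 0 [])) 1).foldl
      (fun acc i =>
        acc ++ [PySem.List.pyGetD (PySem.List.pyGetD method_item 0 []) i 0,
                PySem.List.pyGetD (PySem.List.pyGetD method_item 1 []) i 0,
                recipe_primary_key]) []
  (PySem.List.pyRange 0 (PySem.List.len method) 3).map
    (fun i => PySem.List.slice method (some i) (some (i + 3)))

-- ===== PORT B =====
-- Literal port of B: go recurses on the two rows in parallel (steps[0], orders[0],
-- then the tails steps[1:], orders[1:]); a shorter orders row (IndexError in Python)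
-- is read through pyGetD with a default and lies outside Pre_ below.
def pvMergeGo (recipe_primary_key : Int) : List Int → List Int → List (List Int)
  | [], _ => []
  | s :: steps, orders =>
      [s, PySem.List.pyGetD orders 0 0, recipe_primary_key] ::
        pvMergeGo recipe_primary_key steps (PySem.List.slice orders (some 1) none)

def merge_recipe_id_into_method_alt (method_item : List (List Int)) (recipe_primary_key : Int) : List (List Int) :=
  if PySem.List.pyGetD method_item 0 [] = [] then []
  else pvMergeGo recipe_primary_key (PySem.List.pyGetD method_item 0 []) (PySem.List.pyGetD method_item 1 [])

-- ===== PRECONDITION & SPEC =====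
-- Pre_ excludes exactly the inputs on which Python A raises IndexError: an empty
-- method_item (method_item[0] raises), and a nonempty first row with a missing or
-- shorter second row (method_item[1][i] raises).  B raises there too.
def Pre_merge_recipe_id_into_method (method_item : List (List Int)) (recipe_primary_key : Int) : Prop :=
  method_item ≠ [] ∧
    (method_item.getD 0 [] = [] ∨
      (2 ≤ method_item.length ∧ (method_item.getD 0 []).length ≤ (method_item.getD 1 []).length))
instance (method_item : List (List Int)) (recipe_primary_key : Int) : Decidable (Pre_merge_recipe_id_into_method method_item recipe_primary_key) := by unfold Pre_merge_recipe_id_into_method; infer_instance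

def pvWitness_merge_recipe_id_into_method : List (List Int) × Int := ([[1, 2], [3, 4]], 7)

def Spec_merge_recipe_id_into_method (method_item : List (List Int)) (recipe_primary_key : Int) (out : List (List Int)) : Prop := out = merge_recipe_id_into_method_alt method_item recipe_primary_key
instance (method_item : List (List Int)) (recipe_primary_key : Int) (out : List (List Int)) : Decidable (Spec_merge_recipe_id_into_method method_item recipe_primary_key out) := by unfold Spec_merge_recipe_id_into_method; infer_instance

-- ===== CLAIM (what is proved, stated in full; the proofs are below) =====
def Claim_equal_merge_recipe_id_into_method : Prop := ∀ (method_item : List (List Int)) (recipe_primary_key : Int), Dom_merge_recipe_id_into_method method_item recipe_primary_key → Pre_merge_recipe_id_into_method method_item recipe_primary_key → Spec_merge_recipe_id_into_method method_item recipe_primary_key (merge_recipe_id_into_method method_item recipe_primary_key)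

-- ===== LEMMAS AND PROOFS =====

-- taking the k-th 3-chunk out of the flattening of length-3 rows gives back row k
lemma flatten_drop_take_three (L : List (List Int)) (h : ∀ r ∈ L, r.length = 3) :
    ∀ (k : Nat) (hk : k < L.length), (L.flatten.drop (3 * k)).take 3 = L[k] := by
  induction L with
  | nil => intro k hk; simp at hk
  | cons r t ih =>
    intro k hk
    cases k with
    | zero =>
      have hr : r.length = 3 := h r (by simp)
      simp [hr]
    | succ k =>
      have hr : r.length = 3 := h r (by simp)
      have : 3 * (k + 1) = r.length + 3 * k := by omega
      rw [List.flatten_cons, this, ← List.drop_drop, List.drop_left]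
      exact ih (fun r hr => h r (by simp [hr])) k (by simpa using hk)

-- the slice comprehension over range(0, 3*|L|, 3) re-chunks the flattening of length-3 rows into L
lemma chunk3_flatten (L : List (List Int)) (h : ∀ r ∈ L, r.length = 3) :
    (PySem.List.pyRange 0 (PySem.List.len L.flatten) 3).map
      (fun i => PySem.List.slice L.flatten (some i) (some (i + 3))) = L := by
  have hlen : L.flatten.length = 3 * L.length := by
    induction L with
    | nil => simp
    | cons r t ih =>
      have hr : r.length = 3 := h r (by simp)
      simp [hr, ih (fun r hr => h r (by simp [hr]))]
      omega
  rw [PySem.List.len_eq, hlen]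
  rw [PySem.List.pyRange_of_pos 0 (3 * L.length : Nat) (by norm_num)]
  by_cases hL : L.length = 0
  · have : L = [] := List.eq_nil_of_length_eq_zero hL
    simp [this]
  · have hcond : (0 : Int) < (3 * L.length : Nat) := by
      have : 0 < L.length := Nat.pos_of_ne_zero hL
      push_cast; omega
    rw [if_pos (by exact_mod_cast hcond)]
    have hcnt : (((3 * L.length : Nat) : Int) - 0 + 3 - 1) / 3 = (L.length : Int) := by
      push_cast; omega
    rw [hcnt]
    simp only [Int.toNat_natCast, List.map_map]
    apply List.ext_getElem (by simp)
    intro k h1 h2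
    simp only [List.getElem_map, List.getElem_range, Function.comp_apply]
    have h3 : (0 : Int) + 3 * (k : Nat) = ((3 * k : Nat) : Int) := by push_cast; ring
    have h4 : ((3 * k : Nat) : Int) + 3 = ((3 * k : Nat) : Int) + ((3 : Nat) : Int) := by norm_num
    rw [h3, h4, PySem.List.slice_natCast_add]
    exact flatten_drop_take_three L h k (by simpa using h2)

-- B's parallel recursion computes the indexed comprehension when orders is long enough
lemma pvMergeGo_eq_map_range (pk : Int) :
    ∀ (steps orders : List Int), steps.length ≤ orders.length →
      pvMergeGo pk steps orders =
        (List.range steps.length).map (fun k => [steps.getD k 0, orders.getD k 0, pk]) := by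
  intro steps
  induction steps with
  | nil => intro orders _; simp [pvMergeGo]
  | cons s t ih =>
    intro orders h
    cases orders with
    | nil => simp at h
    | cons o os =>
      simp only [pvMergeGo, PySem.List.slice_from_one, List.tail_cons, List.length_cons]
      rw [List.range_succ_eq_map, List.map_cons, List.map_map]
      congr 1
      · simp [PySem.List.pyGetD_zero_cons]
      · rw [ih os (by simpa using h)]
        apply List.map_congr_left
        intro k _
        simp [Function.comp]

-- ===== VERDICT (by name: the statement is the Claim_ definition above) =====
theorem merge_recipe_id_into_method_spec : Claim_equal_merge_recipe_id_into_method := by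
  intro mi pk _ hpre
  unfold Spec_merge_recipe_id_into_method merge_recipe_id_into_method merge_recipe_id_into_method_alt
  rw [PySem.List.foldl_append_eq_flatMap
        (fun i => [PySem.List.pyGetD (PySem.List.pyGetD mi 0 []) i 0,
                   PySem.List.pyGetD (PySem.List.pyGetD mi 1 []) i 0, pk])]
  rw [List.nil_append, List.flatMap_def]
  rw [chunk3_flatten _ (by intro r hr; simp at hr; obtain ⟨i, _, rfl⟩ := hr; rfl)]
  set f := PySem.List.pyGetD mi 0 [] with hf
  set s := PySem.List.pyGetD mi 1 [] with hs
  by_cases hempty : f = []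
  · simp [hempty]
  · rw [if_neg hempty]
    have hlen : f.length ≤ s.length := by
      rcases hpre.2 with h0 | ⟨_, h1⟩
      · exact absurd (by simpa [hf, PySem.List.pyGetD_zero] using h0) hempty
      · simpa [hf, hs, PySem.List.pyGetD_zero, PySem.List.pyGetD_ofNat'] using h1
    rw [pvMergeGo_eq_map_range pk f s hlen]
    rw [PySem.List.len_eq, PySem.List.pyRange_one]
    simp only [sub_zero, Int.toNat_natCast, List.map_map]
    apply List.map_congr_left
    intro k hk
    simp [Function.comp, PySem.List.pyGetD_natCast]
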